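-- pv_equiv track=rewrite | github.com/AbiRaja-tech/FrameworkOne | intracity_planner_clean.py | _lex_from_order
-- ===== SOURCE A (Python) =====
-- from typing import Dict, Any, Tuple, List, Optional
--
-- def _lex_from_order(order: List[str]) -> Dict[str, int]:
--     """Generate lexicographic weights from priority order"""
--     SAFE_LEX_BASE = 10**6
--     MAX_WEIGHT = 10**12
--     n = len(order)
--     weights: Dict[str, int] = {}
--     for i, k in enumerate(order):
--         w = SAFE_LEX_BASE ** (n - i)
--         if w > MAX_WEIGHT:
--             w = MAX_WEIGHT
--         weights[k] = int(w)
--     return weights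
-- ===== SOURCE B (Python) =====
-- def _lex_from_order(order):
--     """Generate lexicographic weights from priority order"""
--     weights = {k: 10**12 for k in order}
--     if order:
--         weights[order[-1]] = 10**6
--     return weights
-- ===== Notes on version B (the rewrite author's own statement) =====
-- stated objective: faster
-- what changed: B replaces the per-element bignum power 10**6**(n-i) with direct constants: every key gets 10**12 in one dict comprehension and only the last position is overwritten with 10**6, eliminating all big-integer exponentiation.
import Mathlib
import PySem

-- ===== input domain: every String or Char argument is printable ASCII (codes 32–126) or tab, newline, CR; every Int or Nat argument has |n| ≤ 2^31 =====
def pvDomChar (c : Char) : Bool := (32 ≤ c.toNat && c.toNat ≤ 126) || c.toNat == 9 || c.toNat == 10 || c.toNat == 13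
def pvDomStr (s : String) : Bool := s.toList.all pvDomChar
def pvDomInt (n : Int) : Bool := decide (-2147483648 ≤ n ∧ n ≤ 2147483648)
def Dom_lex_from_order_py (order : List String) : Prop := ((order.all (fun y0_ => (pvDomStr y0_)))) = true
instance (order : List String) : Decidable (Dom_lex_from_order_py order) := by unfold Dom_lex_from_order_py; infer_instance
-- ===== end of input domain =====

-- B avoids A's per-element bignum power: every key gets 10^12 and only the last
-- position is overwritten with 10^6 (objective: faster, no big-integer exponentiation).

-- ===== PORT A =====
-- literal port: w = (10^6)^(n-i), clamped to 10^12 if larger; weights[k] = w, loop over enumerate(order)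
def lex_from_order_py (order : List String) : List (String × Int) :=
  let n : Int := order.length
  let weights : PySem.Dict String Int :=
    (PySem.List.enumerate order).foldl
      (fun w p =>
        let wv : Int := ((10:Int)^6) ^ (n - p.1).toNat  -- n - i ≥ 0 throughout the loop, so toNat is exact
        w.insert p.2 (if wv > (10:Int)^12 then (10:Int)^12 else wv))
      PySem.Dict.empty
  weights.items

-- ===== PORT B =====
def lex_from_order_py_alt (order : List String) : List (String × Int) :=
  let weights : PySem.Dict String Int :=
    order.foldl (fun w k => w.insert k ((10:Int)^12)) PySem.Dict.empty
  let weights' : PySem.Dict String Int :=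
    match PySem.List.pyGet? order (-1) with   -- order[-1]; none exactly when order is empty
    | some k => weights.insert k ((10:Int)^6)
    | none => weights
  weights'.items

-- ===== PRECONDITION & SPEC =====
def Spec_lex_from_order_py (order : List String) (out : List (String × Int)) : Prop := out = lex_from_order_py_alt order
instance (order : List String) (out : List (String × Int)) : Decidable (Spec_lex_from_order_py order out) := by unfold Spec_lex_from_order_py; infer_instance

-- ===== CLAIM (what is proved, stated in full; the proofs are below) =====
def Claim_equal_lex_from_order_py : Prop := ∀ (order : List String), Dom_lex_from_order_py order → Spec_lex_from_order_py order (lex_from_order_py order)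

-- ===== LEMMAS AND PROOFS =====

-- A's loop body inserts 10^12 at every position except the last, where it inserts 10^6
lemma lex_clamp_of_two_le (m : Nat) (h : 2 ≤ m) :
    (if ((10:Int)^6) ^ m > (10:Int)^12 then (10:Int)^12 else ((10:Int)^6) ^ m) = (10:Int)^12 := by
  rcases eq_or_lt_of_le h with h2 | h3
  · subst h2; norm_num
  · have : ((10:Int)^6) ^ 2 < ((10:Int)^6) ^ m :=
      pow_lt_pow_right₀ (by norm_num) h3
    rw [if_pos (by calc (10:Int)^12 = ((10:Int)^6)^2 := by norm_num
                      _ < ((10:Int)^6)^m := this)]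

-- loop invariant: on a nonempty remaining list starting at index s with n = s + length,
-- A's fold equals "insert 10^12 everywhere, then overwrite the last key with 10^6"
lemma lexA_loop_eq (n : Int) :
    ∀ (xs : List String) (s : Int) (d : PySem.Dict String Int) (x : String),
      n = s + (x :: xs).length →
      (PySem.List.enumerate (x :: xs) s).foldl
        (fun w p =>
          let wv : Int := ((10:Int)^6) ^ (n - p.1).toNat
          w.insert p.2 (if wv > (10:Int)^12 then (10:Int)^12 else wv)) d
      = (((x :: xs).foldl (fun w k => w.insert k ((10:Int)^12)) d).insert
          ((x :: xs).getLast (by simp)) ((10:Int)^6)) := by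
  intro xs
  induction xs with
  | nil =>
    intro s d x hn
    have hs : (n - s).toNat = 1 := by
      simp at hn; omega
    simp [PySem.List.enumerate_cons, PySem.List.enumerate_nil, hs,
          PySem.Dict.insert_insert_self]
  | cons y ys ih =>
    intro s d x hn
    have h2 : 2 ≤ (n - s).toNat := by
      simp at hn; omega
    have hn' : n = (s + 1) + (y :: ys).length := by
      simp at hn ⊢; omega
    rw [PySem.List.enumerate_cons]
    simp only [List.foldl_cons]
    rw [lex_clamp_of_two_le _ h2]
    have := ih (s + 1) (d.insert x ((10:Int)^12)) y hn'
    simpa using this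

-- ===== VERDICT (by name: the statement is the Claim_ definition above) =====
theorem lex_from_order_py_spec : Claim_equal_lex_from_order_py := by
  intro order _
  unfold Spec_lex_from_order_py lex_from_order_py lex_from_order_py_alt
  cases order with
  | nil => rfl
  | cons x xs =>
    simp only []
    rw [PySem.List.pyGet?_neg_one,
        List.getLast?_eq_some_getLast (l := x :: xs) (by simp)]
    rw [lexA_loop_eq (((x :: xs).length : Int)) xs 0 PySem.Dict.empty x (by simp)]
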